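-- pv_equiv track=rewrite | github.com/krenak/BSI | 2024-2/prog2/exercicios/arquivo/libmatriz.py | rotDir
-- ===== SOURCE A (Python) =====
-- def rotDir(matriz):
--     for i in range(len(matriz)):
--         for j in range(len(matriz[i]) - 1, -1, -1):
--             if j == (len(matriz[i]) - 1):
--                 x = matriz[i][j]
--             matriz[i][j] = matriz[i][j - 1]
--             if j == 0:
--                 matriz[i][j] = x
--
--     return matriz
-- ===== SOURCE B (Python) =====
-- def rotDir(matriz):
--     for row in matriz:
--         if row:
--             row[:] = [row[-1]] + row[:-1]
--     return matriz
-- ===== Notes on version B (the rewrite author's own statement) =====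
-- stated objective: idiomatic
-- what changed: Replaces the index-by-index backward shifting loop (which walks each row from the end, carrying the saved last element in a temporary) with a per-row slice rebuild: each nonempty row is reassigned in place to [row[-1]] + row[:-1].
import Mathlib
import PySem

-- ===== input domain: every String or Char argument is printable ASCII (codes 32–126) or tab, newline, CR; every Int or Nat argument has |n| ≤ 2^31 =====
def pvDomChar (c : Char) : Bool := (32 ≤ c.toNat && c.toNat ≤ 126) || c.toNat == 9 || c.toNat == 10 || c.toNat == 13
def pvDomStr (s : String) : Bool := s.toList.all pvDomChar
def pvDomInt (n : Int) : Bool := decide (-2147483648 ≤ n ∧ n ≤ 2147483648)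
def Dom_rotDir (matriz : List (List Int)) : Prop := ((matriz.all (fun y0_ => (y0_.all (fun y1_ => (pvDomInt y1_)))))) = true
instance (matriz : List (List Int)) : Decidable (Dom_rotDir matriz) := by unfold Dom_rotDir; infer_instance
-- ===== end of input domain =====

-- B replaces A's index-based backward shifting loop with a per-row slice rebuild
-- ([row[-1]] + row[:-1]); same cost, more idiomatic. Both A and B mutate the rows of
-- the argument in place (B via slice assignment); equivalence here is about the
-- returned value.

-- ===== PORT A =====
-- Python's per-row variable `x` is read only after the j = len-1 iteration sets it,
-- so the initial 0 in the fold state is never observable.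
def stepA (st : List Int × Int) (j : Int) : List Int × Int :=
  let x := if j = (st.1.length : Int) - 1 then PySem.List.pyGetD st.1 j 0 else st.2
  let r := PySem.List.pySetD st.1 j (PySem.List.pyGetD st.1 (j - 1) 0)
  let r := if j = 0 then PySem.List.pySetD r j x else r
  (r, x)

def rotRowA (row : List Int) : List Int :=
  ((PySem.List.pyRange ((row.length : Int) - 1) (-1) (-1)).foldl stepA (row, 0)).1

def rotDir (matriz : List (List Int)) : List (List Int) :=
  matriz.map rotRowA

-- ===== PORT B =====
def rotDir_alt (matriz : List (List Int)) : List (List Int) :=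
  matriz.map (fun row =>
    if row = [] then row
    else PySem.List.pyGetD row (-1) 0 :: PySem.List.slice row none (some (-1)))

-- ===== PRECONDITION & SPEC =====
def Spec_rotDir (matriz : List (List Int)) (out : List (List Int)) : Prop := out = rotDir_alt matriz
instance (matriz : List (List Int)) (out : List (List Int)) : Decidable (Spec_rotDir matriz out) := by unfold Spec_rotDir; infer_instance

-- ===== CLAIM (what is proved, stated in full; the proofs are below) =====
def Claim_equal_rotDir : Prop := ∀ (matriz : List (List Int)), Dom_rotDir matriz → Spec_rotDir matriz (rotDir matriz)

-- ===== LEMMAS AND PROOFS =====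

-- Invariant of A's inner loop: after processing j = n-1 … j+1, the row is
-- take (j+1) ++ (drop j).dropLast and x holds the original last element.
theorem loopA_inv (orig : List Int) (h : orig ≠ []) (j : Nat) (hj : j < orig.length)
    (x0 : Int) (hx : j + 1 < orig.length → x0 = orig.getLast h) :
    (PySem.List.pyRange (j : Int) (-1) (-1)).foldl stepA
      (orig.take (j+1) ++ (orig.drop j).dropLast, x0)
      = (orig.getLast h :: orig.dropLast, orig.getLast h) := by
  induction j generalizing x0 with
  | zero =>
    obtain ⟨a, t, rfl⟩ : ∃ a t, orig = a :: t := by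
      cases orig with
      | nil => exact absurd rfl h
      | cons a t => exact ⟨a, t, rfl⟩
    rw [show ((0 : Nat) : Int) = 0 by norm_num,
        PySem.List.pyRange_neg_one_cons (by norm_num),
        PySem.List.pyRange_neg_one_eq_nil (by norm_num)]
    simp only [List.take, List.drop, List.foldl, List.cons_append, List.nil_append]
    simp only [stepA, show (0 : Int) - 1 = -1 by norm_num,
      PySem.List.pyGetD_neg_one _ 0 (List.cons_ne_nil a ((a :: t).dropLast)),
      PySem.List.pyGetD_zero_cons,
      PySem.List.pySetD_of_nonneg (i := (0 : Int)) _ _ le_rfl,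
      Int.toNat_zero, List.set_cons_zero]
    by_cases h1 : t = []
    · subst h1
      simp
    · have hcond : ¬((0:Int) = ((a :: (a :: t).dropLast).length : Int) - 1) := by
        have : 0 < t.length := List.length_pos_iff.mpr h1
        simp only [List.length_cons, List.length_dropLast]
        push_cast
        omega
      rw [if_pos trivial, if_neg hcond, hx (by simpa using List.length_pos_iff.mpr h1)]
  | succ j ih =>
    have hj' : j < orig.length := Nat.lt_of_succ_lt hj
    have hdl : orig.drop (j+1) ≠ [] := by
      intro hc
      have := List.length_drop (l := orig) (i := j+1)
      rw [hc] at this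
      simp at this; omega
    rw [PySem.List.pyRange_neg_one_cons (by push_cast; omega)]
    simp only [List.foldl]
    have hlen : (orig.take (j+1+1) ++ (orig.drop (j+1)).dropLast).length = orig.length := by
      simp [List.length_dropLast]
      omega
    have htake : orig.take (j+1+1) = orig.take (j+1) ++ [orig[j+1]] := by
      rw [List.take_add_one]
      simp [List.getElem?_eq_getElem hj]
    have hget : PySem.List.pyGetD (orig.take (j+1+1) ++ (orig.drop (j+1)).dropLast)
        ((j:Int)+1-1) 0 = orig[j] := by
      have hc2 : ((j:Int)+1-1) = ((j:Nat):Int) := by ring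
      rw [hc2, PySem.List.pyGetD_natCast]
      rw [List.getD_eq_getElem?_getD, List.getElem?_append_left (by simp; omega),
        List.getElem?_take_of_lt (by omega), List.getElem?_eq_getElem hj']
      rfl
    have hxeq : (if ((j:Int)+1) = ((orig.take (j+1+1) ++ (orig.drop (j+1)).dropLast).length : Int) - 1
        then PySem.List.pyGetD (orig.take (j+1+1) ++ (orig.drop (j+1)).dropLast) ((j:Int)+1) 0
        else x0) = orig.getLast h := by
      rw [hlen]
      by_cases hc : j + 1 + 1 < orig.length
      · rw [if_neg (by omega)]
        exact hx hc
      · rw [if_pos (by omega)]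
        have hg1 : PySem.List.pyGetD (orig.take (j+1+1) ++ (orig.drop (j+1)).dropLast)
            ((j:Int)+1) 0 = orig[j+1] := by
          have hc3 : ((j:Int)+1) = (((j+1:Nat)):Int) := by push_cast; ring
          rw [hc3, PySem.List.pyGetD_natCast]
          rw [List.getD_eq_getElem?_getD, List.getElem?_append_left (by simp; omega),
            List.getElem?_take_of_lt (by omega), List.getElem?_eq_getElem hj]
          rfl
        rw [hg1, List.getLast_eq_getElem]
        congr 1
        omega
    have hsetrow : PySem.List.pySetD (orig.take (j+1+1) ++ (orig.drop (j+1)).dropLast)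
        ((j:Int)+1) orig[j] = orig.take (j+1) ++ (orig.drop j).dropLast := by
      rw [PySem.List.pySetD_of_nonneg _ _ (by positivity)]
      have hcast : (((j:Int)+1)).toNat = j + 1 := by omega
      have hdj : orig.drop j = orig[j] :: orig.drop (j+1) :=
        List.drop_eq_getElem_cons hj'
      rw [hcast, htake, List.append_assoc,
        List.set_append_right _ _ (by simp [List.length_take]),
        hdj, List.dropLast_cons_of_ne_nil hdl]
      simp [List.length_take, Nat.min_eq_left (Nat.le_of_lt hj)]
    have hstep : stepA (orig.take (j+1+1) ++ (orig.drop (j+1)).dropLast, x0) ((j:Int)+1)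
        = (orig.take (j+1) ++ (orig.drop j).dropLast, orig.getLast h) := by
      simp only [stepA, hxeq, hget, hsetrow]
      rw [if_neg (show ¬((j:Int)+1 = 0) by omega)]
    push_cast
    rw [hstep]
    have hc4 : ((j:Int)+1) - 1 = ((j:Nat):Int) := by ring
    rw [hc4]
    exact ih hj' _ (fun _ => rfl)

-- Per-row agreement of the two ports.
theorem rotRow_eq (row : List Int) :
    rotRowA row = (if row = [] then row
      else PySem.List.pyGetD row (-1) 0 :: PySem.List.slice row none (some (-1))) := by
  by_cases h : row = []
  · subst h; decide
  · rw [if_neg h, PySem.List.pyGetD_neg_one _ 0 h, PySem.List.slice_to_neg_one]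
    have hn : 1 ≤ row.length := List.length_pos_iff.mpr h
    have hinit : row = row.take (row.length - 1 + 1) ++ (row.drop (row.length - 1)).dropLast := by
      have h1 : row.take (row.length - 1 + 1) = row := List.take_of_length_le (by omega)
      have h2 : (row.drop (row.length - 1)).dropLast = [] := by
        have h3 : (row.drop (row.length - 1)).length = 1 := by
          rw [List.length_drop]; omega
        obtain ⟨a, ha⟩ := List.length_eq_one_iff.mp h3
        rw [ha]; rfl
      rw [h1, h2, List.append_nil]
    have hmain := loopA_inv row h (row.length - 1) (by omega) 0 (by omega)
    rw [← hinit] at hmain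
    unfold rotRowA
    rw [show ((row.length : Int) - 1) = (((row.length - 1 : Nat)) : Int) by omega,
      hmain]

-- ===== VERDICT (by name: the statement is the Claim_ definition above) =====
theorem rotDir_spec : Claim_equal_rotDir := by
  intro matriz _
  unfold Spec_rotDir rotDir rotDir_alt
  exact List.map_congr_left (fun row _ => rotRow_eq row)
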